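-- pv_equiv track=rewrite | github.com/KavyaVakala02/V.Kavya_Week1_Assessment | Exam-1/Q9.stringanalyze.py | analyze_string
-- ===== SOURCE A (Python) =====
-- def analyze_string(input_string):
--     vowel_count = 0
--     consonant_count = 0
--     digit_count = 0
--     special_char_count = 0
--     for character in input_string:
--         if character.lower() in "aeiou":
--             vowel_count += 1
--         elif character.isalpha():
--             consonant_count += 1
--         elif character.isdigit():
--             digit_count += 1
--         elif not character.isspace():
--             special_char_count += 1
--     reversed_string = input_string[::-1]
--     return (vowel_count, consonant_count, digit_count, special_char_count, reversed_string)
-- ===== SOURCE B (Python) =====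
-- def analyze_string(input_string):
--     s = input_string
--     vowels = sum(c in "aeiouAEIOU" for c in s)
--     alphas = sum(c.isalpha() for c in s)
--     digits = sum(c.isdigit() for c in s)
--     spaces = sum(c.isspace() for c in s)
--     return (vowels, alphas - vowels, digits,
--             len(s) - alphas - digits - spaces, s[::-1])
-- ===== Notes on version B (the rewrite author's own statement) =====
-- stated objective: alternative
-- what changed: Replaces the mutually-exclusive elif chain with four independent whole-string category counts (vowels, letters, digits, whitespace) and derives consonants and specials by complement arithmetic (alpha - vowels, len - alpha - digits - spaces).
import Mathlib
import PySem

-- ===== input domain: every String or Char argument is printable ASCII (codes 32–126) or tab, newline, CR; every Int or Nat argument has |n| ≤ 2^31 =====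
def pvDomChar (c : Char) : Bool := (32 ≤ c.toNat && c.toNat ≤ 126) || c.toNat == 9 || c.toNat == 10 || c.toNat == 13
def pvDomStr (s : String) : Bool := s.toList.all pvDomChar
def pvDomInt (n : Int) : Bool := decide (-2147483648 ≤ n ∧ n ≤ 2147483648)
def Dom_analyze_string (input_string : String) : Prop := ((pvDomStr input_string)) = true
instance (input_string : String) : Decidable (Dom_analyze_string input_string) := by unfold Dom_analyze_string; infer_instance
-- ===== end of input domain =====

-- B replaces A's mutually-exclusive elif-chain loop by four independent category counts
-- plus complement arithmetic (consonants = alpha - vowels, specials = len - alpha - digits - spaces); alternative decomposition, same cost.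


-- ===== PORT A =====
-- `character.lower() in "aeiou"`: the left side is a single character, so the substring
-- test is exactly membership of lowerChar c among the vowel characters (exact).
def pvStepA (st : Int × Int × Int × Int) (c : Char) : Int × Int × Int × Int :=
  if PySem.Chars.lowerChar c ∈ ['a', 'e', 'i', 'o', 'u'] then
    (st.1 + 1, st.2.1, st.2.2.1, st.2.2.2)
  else if PySem.Chars.isalpha c then
    (st.1, st.2.1 + 1, st.2.2.1, st.2.2.2)
  else if PySem.Chars.isdigit c then
    (st.1, st.2.1, st.2.2.1 + 1, st.2.2.2)
  else if !(PySem.Chars.isspace c) then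
    (st.1, st.2.1, st.2.2.1, st.2.2.2 + 1)
  else st

def analyze_string (input_string : String) : Int × Int × Int × Int × String :=
  let st := input_string.toList.foldl pvStepA (0, 0, 0, 0)
  -- input_string[::-1]; step -1 never raises, so the `none` branch is unreachable
  let reversed_string := (PySem.Str.slice? input_string none none (-1)).getD input_string
  (st.1, st.2.1, st.2.2.1, st.2.2.2, reversed_string)

-- ===== PORT B =====
-- sum(bool for c in s) is ported as countP (cast to Int), len(s) as PySem.Str.len.
def analyze_string_alt (input_string : String) : Int × Int × Int × Int × String :=
  let cs := input_string.toList
  let vowels : Int := (cs.countP (fun c => c ∈ "aeiouAEIOU".toList) : Int)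
  let alphas : Int := (cs.countP (fun c => PySem.Chars.isalpha c) : Int)
  let digits : Int := (cs.countP (fun c => PySem.Chars.isdigit c) : Int)
  let spaces : Int := (cs.countP (fun c => PySem.Chars.isspace c) : Int)
  (vowels, alphas - vowels, digits,
    PySem.Str.len input_string - alphas - digits - spaces,
    (PySem.Str.slice? input_string none none (-1)).getD input_string)

-- ===== PRECONDITION & SPEC =====
def Spec_analyze_string (input_string : String) (out : Int × Int × Int × Int × String) : Prop := out = analyze_string_alt input_string
instance (input_string : String) (out : Int × Int × Int × Int × String) : Decidable (Spec_analyze_string input_string out) := by unfold Spec_analyze_string; infer_instance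

-- ===== CLAIM (what is proved, stated in full; the proofs are below) =====
def Claim_equal_analyze_string : Prop := ∀ (input_string : String), Dom_analyze_string input_string → Spec_analyze_string input_string (analyze_string input_string)

-- ===== LEMMAS AND PROOFS =====

-- the per-character category facts the equivalence needs, as one boolean predicate
def pvCharOK (c : Char) : Bool :=
    (decide (PySem.Chars.lowerChar c ∈ ['a', 'e', 'i', 'o', 'u'])
       == decide (c ∈ "aeiouAEIOU".toList))
  && (!(decide (c ∈ "aeiouAEIOU".toList)) || PySem.Chars.isalpha c)
  && (!(PySem.Chars.isdigit c) || !(PySem.Chars.isalpha c))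
  && (!(PySem.Chars.isspace c) || (!(PySem.Chars.isalpha c) && !(PySem.Chars.isdigit c)))

set_option maxRecDepth 8192 in
lemma pvCharOK_all : ∀ n : Fin 128, pvCharOK (Char.ofNat n.val) = true := by decide

lemma pvCharOK_of_dom (c : Char) (hd : pvDomChar c = true) : pvCharOK c = true := by
  have h1 : c.toNat < 128 := by simp [pvDomChar] at hd; omega
  have := pvCharOK_all ⟨c.toNat, h1⟩
  simpa [Char.ofNat_toNat] using this

-- the loop invariant: folding A's step adds B's four category counts
lemma pv_foldA_eq (cs : List Char) (h : cs.all pvDomChar = true) :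
    ∀ st : Int × Int × Int × Int,
    cs.foldl pvStepA st =
      (st.1 + (cs.countP (fun c => c ∈ "aeiouAEIOU".toList) : Int),
       st.2.1 + ((cs.countP (fun c => PySem.Chars.isalpha c) : Int)
                 - (cs.countP (fun c => c ∈ "aeiouAEIOU".toList) : Int)),
       st.2.2.1 + (cs.countP (fun c => PySem.Chars.isdigit c) : Int),
       st.2.2.2 + ((cs.length : Int)
                   - (cs.countP (fun c => PySem.Chars.isalpha c) : Int)
                   - (cs.countP (fun c => PySem.Chars.isdigit c) : Int)
                   - (cs.countP (fun c => PySem.Chars.isspace c) : Int))) := by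
  induction cs with
  | nil => intro st; simp
  | cons c t ih =>
    intro st
    simp only [List.all_cons, Bool.and_eq_true] at h
    obtain ⟨hc, ht⟩ := h
    have hck := pvCharOK_of_dom c hc
    simp only [pvCharOK, Bool.and_eq_true, beq_iff_eq, decide_eq_decide, Bool.or_eq_true,
      Bool.not_eq_true', decide_eq_false_iff_not] at hck
    obtain ⟨⟨⟨hiff, himp⟩, hda⟩, hsp⟩ := hck
    rw [List.foldl_cons, ih ht (pvStepA st c)]
    by_cases hv : c ∈ "aeiouAEIOU".toList
    · have halpha : PySem.Chars.isalpha c = true := himp.resolve_left (not_not_intro hv)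
      have hdig : PySem.Chars.isdigit c = false := by rcases hda with h' | h' <;> simp_all
      have hspc : PySem.Chars.isspace c = false := by rcases hsp with h' | h' <;> simp_all
      have hvd : decide (c ∈ "aeiouAEIOU".toList) = true := decide_eq_true hv
      have hstep : pvStepA st c = (st.1 + 1, st.2.1, st.2.2.1, st.2.2.2) := by
        unfold pvStepA; rw [if_pos (hiff.mpr hv)]
      rw [hstep]
      simp only [List.countP_cons, List.length_cons, hvd, halpha, hdig, hspc,
        if_true, Bool.false_eq_true, if_false, Prod.ext_iff]
      push_cast; omega
    · have hnv : PySem.Chars.lowerChar c ∉ ['a', 'e', 'i', 'o', 'u'] :=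
        fun hx => hv (hiff.mp hx)
      have hvd : decide (c ∈ "aeiouAEIOU".toList) = false := decide_eq_false hv
      by_cases halpha : PySem.Chars.isalpha c = true
      · have hdig : PySem.Chars.isdigit c = false := by rcases hda with h' | h' <;> simp_all
        have hspc : PySem.Chars.isspace c = false := by rcases hsp with h' | h' <;> simp_all
        have hstep : pvStepA st c = (st.1, st.2.1 + 1, st.2.2.1, st.2.2.2) := by
          unfold pvStepA; rw [if_neg hnv, if_pos halpha]
        rw [hstep]
        simp only [List.countP_cons, List.length_cons, hvd, halpha, hdig, hspc,
          if_true, Bool.false_eq_true, if_false, Prod.ext_iff]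
        push_cast; omega
      · have halpha' : PySem.Chars.isalpha c = false := by simpa using halpha
        by_cases hdig : PySem.Chars.isdigit c = true
        · have hspc : PySem.Chars.isspace c = false := by rcases hsp with h' | h' <;> simp_all
          have hstep : pvStepA st c = (st.1, st.2.1, st.2.2.1 + 1, st.2.2.2) := by
            unfold pvStepA; rw [if_neg hnv, if_neg (by simp [halpha']), if_pos hdig]
          rw [hstep]
          simp only [List.countP_cons, List.length_cons, hvd, halpha', hdig, hspc,
            if_true, Bool.false_eq_true, if_false, Prod.ext_iff]
          push_cast; omega
        · have hdig' : PySem.Chars.isdigit c = false := by simpa using hdig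
          by_cases hspc : PySem.Chars.isspace c = true
          · have hstep : pvStepA st c = st := by
              unfold pvStepA
              rw [if_neg hnv, if_neg (by simp [halpha']), if_neg (by simp [hdig']),
                if_neg (by simp [hspc])]
            rw [hstep]
            simp only [List.countP_cons, List.length_cons, hvd, halpha', hdig', hspc,
              if_true, Bool.false_eq_true, if_false, Prod.ext_iff]
            push_cast; omega
          · have hspc' : PySem.Chars.isspace c = false := by simpa using hspc
            have hstep : pvStepA st c = (st.1, st.2.1, st.2.2.1, st.2.2.2 + 1) := by
              unfold pvStepA
              rw [if_neg hnv, if_neg (by simp [halpha']), if_neg (by simp [hdig']),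
                if_pos (by simp [hspc'])]
            rw [hstep]
            simp only [List.countP_cons, List.length_cons, hvd, halpha', hdig', hspc',
              Bool.false_eq_true, if_false, Prod.ext_iff]
            push_cast; omega

-- ===== VERDICT (by name: the statement is the Claim_ definition above) =====
theorem analyze_string_spec : Claim_equal_analyze_string := by
  intro s hdom
  unfold Spec_analyze_string analyze_string analyze_string_alt
  rw [pv_foldA_eq s.toList hdom (0, 0, 0, 0)]
  simp [PySem.Str.len_eq]
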